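-- pv_equiv track=rewrite | github.com/teamteamdev/kettlectf-2021 | tasks/brokenbot/app/server.py | is_digitalpha
-- ===== SOURCE A (Python) =====
-- def is_digitalpha(text):
--     text = list(text)
--     flags = [False, False]
--     for i in text:
--         if i.isdigit():
--             flags[0] = True
--         elif not i.isdigit():
--             flags[1] = True
--
--     if flags[0] == True and flags[1] == True:
--         return True
--     else:
--         return False
-- ===== SOURCE B (Python) =====
-- def is_digitalpha(text):
--     chars = list(text)
--     ndigits = sum(1 for c in chars if c.isdigit())
--     return 0 < ndigits < len(chars)
-- ===== Notes on version B (the rewrite author's own statement) =====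
-- stated objective: simpler
-- what changed: Replaces the two mutable boolean flags and the flag-AND decision with a single digit counter and a closed-form range test 0 < ndigits < len(chars).
import Mathlib
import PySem

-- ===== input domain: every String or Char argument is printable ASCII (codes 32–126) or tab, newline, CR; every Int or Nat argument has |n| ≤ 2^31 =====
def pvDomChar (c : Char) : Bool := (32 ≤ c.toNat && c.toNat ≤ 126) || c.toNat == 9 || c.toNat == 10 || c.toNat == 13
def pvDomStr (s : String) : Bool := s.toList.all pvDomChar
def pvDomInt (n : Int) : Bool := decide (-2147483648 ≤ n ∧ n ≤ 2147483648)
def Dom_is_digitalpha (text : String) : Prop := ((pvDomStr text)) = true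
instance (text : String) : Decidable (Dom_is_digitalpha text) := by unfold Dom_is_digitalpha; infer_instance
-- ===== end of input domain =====

-- B replaces A's two mutable boolean flags with one digit counter and decides by 0 < ndigits < len (objective: simpler).

-- ===== PORT A =====
-- A: iterate over the characters, setting flags[0] on a digit and flags[1] otherwise, then AND the flags.
def is_digitalpha (text : String) : Bool :=
  let chars := text.toList
  let flags := chars.foldl
    (fun (fl : Bool × Bool) i =>
      if PySem.Chars.isdigit i then (true, fl.2)
      else if ¬ (PySem.Chars.isdigit i) then (fl.1, true)
      else fl)
    (false, false)
  if flags.1 = true ∧ flags.2 = true then true else false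

-- ===== PORT B =====
-- B: count the digit characters in one pass and test 0 < ndigits < len(chars).
def is_digitalpha_alt (text : String) : Bool :=
  let chars := text.toList
  let ndigits := chars.foldl (fun n c => if PySem.Chars.isdigit c then n + 1 else n) 0
  decide (0 < ndigits ∧ ndigits < chars.length)

-- ===== PRECONDITION & SPEC =====
def Spec_is_digitalpha (text : String) (out : Bool) : Prop := out = is_digitalpha_alt text
instance (text : String) (out : Bool) : Decidable (Spec_is_digitalpha text out) := by unfold Spec_is_digitalpha; infer_instance

-- ===== CLAIM (what is proved, stated in full; the proofs are below) =====
def Claim_equal_is_digitalpha : Prop := ∀ (text : String), Dom_is_digitalpha text → Spec_is_digitalpha text (is_digitalpha text)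

-- ===== LEMMAS AND PROOFS =====

-- A's flag loop computes "some digit seen" and "some non-digit seen".
theorem pv_flags (l : List Char) (f0 f1 : Bool) :
    l.foldl
      (fun (fl : Bool × Bool) i =>
        if PySem.Chars.isdigit i then (true, fl.2)
        else if ¬ (PySem.Chars.isdigit i) then (fl.1, true)
        else fl)
      (f0, f1)
    = (f0 || l.any (fun c => PySem.Chars.isdigit c),
       f1 || l.any (fun c => ! PySem.Chars.isdigit c)) := by
  induction l generalizing f0 f1 with
  | nil => simp
  | cons c l ih =>
    rw [List.foldl_cons]
    by_cases h : PySem.Chars.isdigit c = true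
    · rw [if_pos h, ih]; simp [h]
    · rw [if_neg h, if_pos h, ih]; simp [h]

-- B's counter loop is countP.
theorem pv_count (l : List Char) (n : Nat) :
    l.foldl (fun n c => if PySem.Chars.isdigit c then n + 1 else n) n
    = n + l.countP (fun c => PySem.Chars.isdigit c) := by
  induction l generalizing n with
  | nil => simp
  | cons c l ih =>
    by_cases h : PySem.Chars.isdigit c <;>
      simp [h, ih] <;> omega

-- ===== VERDICT (by name: the statement is the Claim_ definition above) =====
theorem is_digitalpha_spec : Claim_equal_is_digitalpha := by
  intro text _
  show _ = _
  unfold is_digitalpha is_digitalpha_alt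
  simp only [pv_flags, pv_count, Bool.false_or, Nat.zero_add]
  set l := text.toList
  rcases h0 : l.any (fun c => PySem.Chars.isdigit c) <;>
  rcases h1 : l.any (fun c => ! PySem.Chars.isdigit c) <;>
    simp_all [List.any_eq_true, List.countP_pos_iff, List.countP_lt_length_iff]
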